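-- pv_equiv track=rewrite | github.com/Imonymous/Practice | Interviews/Amazon/packages.py | IDsOfPackages
-- ===== SOURCE A (Python) =====
-- def IDsOfPackages(truckSpace, packagesSpace):
--     # WRITE YOUR CODE HERE
--     safetyUnits = 30
--
--     if truckSpace > safetyUnits:
--         realTruckSpace = truckSpace - safetyUnits
--     else:
--         return
--
--     ans = [0, 0]
--     first = True
--     for i in range(len(packagesSpace)):
--         p = packagesSpace[i]
--         if p < realTruckSpace:
--             max_comp = realTruckSpace - p
--             for j in range(i, len(packagesSpace)):
--                 comp = packagesSpace[j]
--                 if comp == max_comp: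
--                     candidate = sorted([i,j])
--                     if first:
--                         ans = candidate
--                         first = False
--                         continue
--
--                     if (((packagesSpace[ans[0]]+packagesSpace[ans[1]]) == (packagesSpace[candidate[0]]+packagesSpace[candidate[1]])) and
--                         max(packagesSpace[ans[0]], packagesSpace[ans[1]]) < max(packagesSpace[candidate[0]], packagesSpace[candidate[1]])):
--                         ans = candidate
--     return ans
-- ===== SOURCE B (Python) =====
-- def IDsOfPackages(truckSpace, packagesSpace):
--     # O(n): backward hash pass (value -> next index) + single forward best-pair selection
--     if truckSpace <= 30:
--         return None
--     real = truckSpace - 30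
--     n = len(packagesSpace)
--     nxt = {}
--     rev_partner = []
--     for i in range(n - 1, -1, -1):
--         v = packagesSpace[i]
--         nxt[v] = i
--         rev_partner.append(nxt.get(real - v) if v < real else None)
--     best = None
--     i = 0
--     for j in reversed(rev_partner):
--         if j is not None:
--             m = max(packagesSpace[i], packagesSpace[j])
--             if best is None or m > best[2]:
--                 best = (i, j, m)
--         i += 1
--     if best is None:
--         return [0, 0]
--     return [best[0], best[1]]
-- ===== Notes on version B (the rewrite author's own statement) =====
-- stated objective: faster
-- what changed: Replaces the O(n^2) nested index scan with a backward hash pass (value -> next occurrence index) that yields each index's earliest partner, followed by one forward pass selecting the first pair attaining the maximal larger element.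
import Mathlib
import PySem

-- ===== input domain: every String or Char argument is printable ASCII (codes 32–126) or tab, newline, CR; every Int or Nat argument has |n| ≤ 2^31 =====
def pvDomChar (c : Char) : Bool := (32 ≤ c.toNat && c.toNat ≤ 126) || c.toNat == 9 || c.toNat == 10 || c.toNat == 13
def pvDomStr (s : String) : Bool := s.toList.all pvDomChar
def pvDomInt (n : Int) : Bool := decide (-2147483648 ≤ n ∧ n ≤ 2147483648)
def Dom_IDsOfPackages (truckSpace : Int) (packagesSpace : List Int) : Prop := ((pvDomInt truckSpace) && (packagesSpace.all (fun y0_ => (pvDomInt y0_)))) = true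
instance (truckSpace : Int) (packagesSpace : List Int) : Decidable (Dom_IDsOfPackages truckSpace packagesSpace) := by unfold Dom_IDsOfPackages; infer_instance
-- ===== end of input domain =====

-- B replaces A's quadratic nested index scan by a linear backward hash pass (value → next
-- occurrence) plus one forward selection pass; measured asymptotically faster.

-- ===== PORT A =====
-- A-side helpers: the two loop bodies of A, transcribed step for step.
def pvInnerA (xs : List Int) (realTruckSpace i : Int) (st : List Int × Bool) (j : Int) : List Int × Bool :=
  let p := PySem.List.pyGetD xs i 0
  let max_comp := realTruckSpace - p
  let comp := PySem.List.pyGetD xs j 0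
  if comp == max_comp then
    let candidate := PySem.List.sorted [i, j] (fun x => x) false
    if st.2 then (candidate, false)
    else
      if (PySem.List.pyGetD xs (PySem.List.pyGetD st.1 0 0) 0 + PySem.List.pyGetD xs (PySem.List.pyGetD st.1 1 0) 0
            == PySem.List.pyGetD xs (PySem.List.pyGetD candidate 0 0) 0 + PySem.List.pyGetD xs (PySem.List.pyGetD candidate 1 0) 0)
         && (max (PySem.List.pyGetD xs (PySem.List.pyGetD st.1 0 0) 0) (PySem.List.pyGetD xs (PySem.List.pyGetD st.1 1 0) 0)
              < max (PySem.List.pyGetD xs (PySem.List.pyGetD candidate 0 0) 0) (PySem.List.pyGetD xs (PySem.List.pyGetD candidate 1 0) 0))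
      then (candidate, st.2) else st
  else st

def pvOuterA (xs : List Int) (realTruckSpace : Int) (st : List Int × Bool) (i : Int) : List Int × Bool :=
  let p := PySem.List.pyGetD xs i 0
  if p < realTruckSpace then
    (PySem.List.pyRange i (xs.length : Int) 1).foldl (pvInnerA xs realTruckSpace i) st
  else st

def IDsOfPackages (truckSpace : Int) (packagesSpace : List Int) : Option (List Int) :=
  let safetyUnits : Int := 30
  if truckSpace > safetyUnits then
    let realTruckSpace := truckSpace - safetyUnits
    some ((PySem.List.pyRange 0 (packagesSpace.length : Int) 1).foldl
            (pvOuterA packagesSpace realTruckSpace) ([0, 0], true)).1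
  else none

-- ===== PORT B =====
-- B-side helpers: backward pass body (dict of next occurrence + reversed partner list) and
-- the forward selection body (best = (i, j, max element), counter).
def pvBackB (xs : List Int) (real : Int) (st : PySem.Dict Int Int × List (Option Int)) (i : Int) :
    PySem.Dict Int Int × List (Option Int) :=
  let v := PySem.List.pyGetD xs i 0
  let nxt := st.1.insert v i
  (nxt, st.2 ++ [if v < real then nxt.get? (real - v) else none])

def pvSelB (xs : List Int) (st : Option (Int × Int × Int) × Int) (jo : Option Int) :
    Option (Int × Int × Int) × Int :=
  match jo with
  | none => (st.1, st.2 + 1)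
  | some j =>
    let m := max (PySem.List.pyGetD xs st.2 0) (PySem.List.pyGetD xs j 0)
    let best :=
      match st.1 with
      | none => some (st.2, j, m)
      | some b => if m > b.2.2 then some (st.2, j, m) else st.1
    (best, st.2 + 1)

def IDsOfPackages_alt (truckSpace : Int) (packagesSpace : List Int) : Option (List Int) :=
  if truckSpace ≤ 30 then none
  else
    let real := truckSpace - 30
    let n : Int := (packagesSpace.length : Int)
    let bp := (PySem.List.pyRange (n - 1) (-1) (-1)).foldl (pvBackB packagesSpace real) (PySem.Dict.empty, [])
    let st := bp.2.reverse.foldl (pvSelB packagesSpace) (none, 0)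
    match st.1 with
    | none => some [0, 0]
    | some b => some [b.1, b.2.1]

-- ===== PRECONDITION & SPEC =====
def Spec_IDsOfPackages (truckSpace : Int) (packagesSpace : List Int) (out : Option (List Int)) : Prop := out = IDsOfPackages_alt truckSpace packagesSpace
instance (truckSpace : Int) (packagesSpace : List Int) (out : Option (List Int)) : Decidable (Spec_IDsOfPackages truckSpace packagesSpace out) := by unfold Spec_IDsOfPackages; infer_instance

-- ===== CLAIM (what is proved, stated in full; the proofs are below) =====
def Claim_equal_IDsOfPackages : Prop := ∀ (truckSpace : Int) (packagesSpace : List Int), Dom_IDsOfPackages truckSpace packagesSpace → Spec_IDsOfPackages truckSpace packagesSpace (IDsOfPackages truckSpace packagesSpace)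


-- ===== LEMMAS AND PROOFS =====

-- shorthand for packagesSpace[i] (index always in range where used)
def pvG (xs : List Int) (i : Int) : Int := PySem.List.pyGetD xs i 0

-- first j in [k, len) with xs[j] = v
def pvFind (xs : List Int) (v k : Int) : Option Int :=
  (PySem.List.pyRange k (xs.length : Int) 1).find? (fun j => PySem.List.pyGetD xs j 0 == v)

-- the partner produced for index i by B's backward pass
def pvEntry (xs : List Int) (r i : Int) : Option Int :=
  if pvG xs i < r then pvFind xs (r - pvG xs i) i else none

-- the effect of A's inner loop, collapsed to its first matching j
def pvStep (xs : List Int) (st : List Int × Bool) (i j : Int) : List Int × Bool :=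
  if st.2 then ([i, j], false)
  else if max (pvG xs (PySem.List.pyGetD st.1 0 0)) (pvG xs (PySem.List.pyGetD st.1 1 0))
          < max (pvG xs i) (pvG xs j) then ([i, j], false) else st

-- simulation relation between A's (ans, first) and B's best
def pvRel (xs : List Int) (r : Int) (st : List Int × Bool) (best : Option (Int × Int × Int)) : Prop :=
  (st = ([0, 0], true) ∧ best = none) ∨
  ∃ a b, st = ([a, b], false) ∧ best = some (a, b, max (pvG xs a) (pvG xs b)) ∧ pvG xs a + pvG xs b = r

theorem pvGetD_pair_zero (a b : Int) : PySem.List.pyGetD [a, b] 0 0 = a := rfl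

theorem pvGetD_pair_one (a b : Int) : PySem.List.pyGetD [a, b] 1 0 = b := rfl

theorem pv_sorted_pair (i j : Int) (h : i ≤ j) :
    PySem.List.sorted [i, j] (fun x => x) false = [i, j] := by
  apply PySem.List.sorted_eq_self_of_pairwise
  simp [List.pairwise_cons]
  exact h

theorem pvFind_some (xs : List Int) (v k j : Int) (h : pvFind xs v k = some j) :
    k ≤ j ∧ pvG xs j = v := by
  unfold pvFind at h
  have hmem := List.mem_of_find?_eq_some h
  have hpred := List.find?_some h
  rw [PySem.List.mem_pyRange_one] at hmem
  refine ⟨hmem.1, ?_⟩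
  simpa [pvG] using hpred

-- saturation: once ans holds a pair of sum r whose max dominates M(i), further matches are no-ops
theorem pv_sat (xs : List Int) (r i : Int) :
    ∀ (m : Nat) (k a b : Int), ((xs.length : Int) - k).toNat = m → i ≤ k →
      pvG xs a + pvG xs b = r →
      max (pvG xs i) (r - pvG xs i) ≤ max (pvG xs a) (pvG xs b) →
      (PySem.List.pyRange k (xs.length : Int) 1).foldl (pvInnerA xs r i) ([a, b], false) = ([a, b], false) := by
  intro m
  induction m with
  | zero =>
    intro k a b hm hik hsum hmax
    rw [PySem.List.pyRange_one_eq_nil (by omega)]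
    rfl
  | succ m ih =>
    intro k a b hm hik hsum hmax
    have hk : k < (xs.length : Int) := by omega
    rw [PySem.List.pyRange_one_cons hk, List.foldl_cons]
    have hstep : pvInnerA xs r i ([a, b], false) k = ([a, b], false) := by
      unfold pvInnerA
      by_cases hmatch : PySem.List.pyGetD xs k 0 = r - PySem.List.pyGetD xs i 0
      · simp only [hmatch, beq_self_eq_true, if_true]
        rw [pv_sorted_pair i k hik]
        simp only [pvGetD_pair_zero, pvGetD_pair_one]
        have hle : max (pvG xs i) (pvG xs k) ≤ max (pvG xs a) (pvG xs b) := by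
          have : pvG xs k = r - pvG xs i := hmatch
          rw [this]; exact hmax
        have : ¬ (max (pvG xs a) (pvG xs b) < max (pvG xs i) (pvG xs k)) := not_lt.mpr hle
        simp [pvG] at this ⊢
        omega
      · simp [hmatch]
    rw [hstep]
    exact ih (k + 1) a b (by omega) (by omega) hsum hmax

-- A-only invariant
def pvInvA (xs : List Int) (r : Int) (st : List Int × Bool) : Prop :=
  st = ([0, 0], true) ∨ ∃ a b, st = ([a, b], false) ∧ pvG xs a + pvG xs b = r

-- inner-loop collapse: A's inner loop equals one pvStep at the first matching j
theorem pv_inner (xs : List Int) (r i : Int) :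
    ∀ (m : Nat) (k : Int) (st : List Int × Bool), ((xs.length : Int) - k).toNat = m → i ≤ k →
      pvInvA xs r st →
      (PySem.List.pyRange k (xs.length : Int) 1).foldl (pvInnerA xs r i) st =
        (match pvFind xs (r - pvG xs i) k with
         | none => st
         | some j => pvStep xs st i j) := by
  intro m
  induction m with
  | zero =>
    intro k st hm hik hinv
    rw [PySem.List.pyRange_one_eq_nil (by omega)]
    simp [pvFind, PySem.List.pyRange_one_eq_nil (by omega : (xs.length : Int) ≤ k)]
  | succ m ih =>
    intro k st hm hik hinv
    have hk : k < (xs.length : Int) := by omega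
    rw [PySem.List.pyRange_one_cons hk, List.foldl_cons]
    have hfind : pvFind xs (r - pvG xs i) k =
        (if PySem.List.pyGetD xs k 0 == r - pvG xs i then some k
         else pvFind xs (r - pvG xs i) (k + 1)) := by
      unfold pvFind
      rw [PySem.List.pyRange_one_cons hk, List.find?_cons]
      split <;> simp_all
    by_cases hmatch : PySem.List.pyGetD xs k 0 = r - PySem.List.pyGetD xs i 0
    · -- k is the first match: one pvStep, then saturation
      have hfk : pvFind xs (r - pvG xs i) k = some k := by
        rw [hfind]; simp [pvG, hmatch]
      rw [hfk]
      have hstep : pvInnerA xs r i st k = pvStep xs st i k := by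
        unfold pvInnerA pvStep
        simp only [hmatch, beq_self_eq_true, if_true]
        rw [pv_sorted_pair i k hik]
        rcases hinv with h0 | ⟨a, b, hst, hsum⟩
        · rw [h0]; simp
        · rw [hst]
          simp only [pvGetD_pair_zero, pvGetD_pair_one]
          have hbeq : (pvG xs a + pvG xs b == pvG xs i + pvG xs k) = true := by
            simp only [pvG] at hsum hmatch ⊢
            simp only [beq_iff_eq]
            omega
          simp only [pvG] at hbeq ⊢
          simp [hbeq]
      rw [hstep]
      have hgk : pvG xs k = r - pvG xs i := hmatch
      have hsat : ∀ a b : Int, pvG xs a + pvG xs b = r →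
          max (pvG xs i) (r - pvG xs i) ≤ max (pvG xs a) (pvG xs b) →
          (PySem.List.pyRange (k + 1) (xs.length : Int) 1).foldl (pvInnerA xs r i) ([a, b], false)
            = ([a, b], false) :=
        fun a b h1 h2 => pv_sat xs r i m (k + 1) a b (by omega) (by omega) h1 h2
      unfold pvStep
      rcases hinv with h0 | ⟨a, b, hst, hsum⟩
      · rw [h0]
        simp only [if_true, show (([0, 0], true) : List Int × Bool).2 = true from rfl]
        exact hsat i k (by simp only [pvG] at hgk ⊢; omega) (by rw [hgk])
      · rw [hst]
        simp only [pvGetD_pair_zero, pvGetD_pair_one,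
          show (([a, b], false) : List Int × Bool).2 = false from rfl, Bool.false_eq_true,
          if_false]
        by_cases hlt : max (pvG xs a) (pvG xs b) < max (pvG xs i) (pvG xs k)
        · simp only [hlt, if_true]
          exact hsat i k (by simp only [pvG] at hgk ⊢; omega) (le_of_eq (by rw [hgk]))
        · simp only [hlt, if_false]
          exact hsat a b hsum (by rw [hgk] at hlt; omega)
    · have hne : (PySem.List.pyGetD xs k 0 == r - pvG xs i) = false := by
        simp only [pvG, beq_eq_false_iff_ne, ne_eq]
        exact hmatch
      rw [hfind, hne]
      simp only [Bool.false_eq_true, if_false]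
      have hstep : pvInnerA xs r i st k = st := by
        unfold pvInnerA
        simp only [pvG] at hne
        simp [hne]
      rw [hstep]
      exact ih (k + 1) st (by omega) (by omega) hinv

-- B's backward pass: dict = next-occurrence table, acc = reversed partner list
theorem pv_back (xs : List Int) (r : Int) :
    ∀ (m : Nat) (k : Int), 0 ≤ k → ((xs.length : Int) - k).toNat = m →
      ∃ D : PySem.Dict Int Int,
        ((PySem.List.pyRange k (xs.length : Int) 1).reverse).foldl (pvBackB xs r) (PySem.Dict.empty, []) =
          (D, ((PySem.List.pyRange k (xs.length : Int) 1).map (pvEntry xs r)).reverse) ∧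
        ∀ v, D.get? v = pvFind xs v k := by
  intro m
  induction m with
  | zero =>
    intro k hk0 hm
    refine ⟨PySem.Dict.empty, ?_, ?_⟩
    · rw [PySem.List.pyRange_one_eq_nil (by omega)]
      rfl
    · intro v
      rw [PySem.Dict.get?_empty]
      unfold pvFind
      rw [PySem.List.pyRange_one_eq_nil (by omega)]
      rfl
  | succ m ih =>
    intro k hk0 hm
    have hk : k < (xs.length : Int) := by omega
    obtain ⟨D', hfold, hchar⟩ := ih (k + 1) (by omega) (by omega)
    rw [PySem.List.pyRange_one_cons hk]
    simp only [List.reverse_cons, List.foldl_append, List.foldl_cons, List.foldl_nil, hfold]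
    have hins : ∀ w, ((D'.insert (PySem.List.pyGetD xs k 0) k).get? w) = pvFind xs w k := by
      intro w
      rw [PySem.Dict.get?_insert]
      unfold pvFind
      rw [PySem.List.pyRange_one_cons hk, List.find?_cons]
      by_cases hw : w = PySem.List.pyGetD xs k 0
      · simp [hw]
      · have : (PySem.List.pyGetD xs k 0 == w) = false := by
          simp [beq_eq_false_iff_ne]; omega
        simp only [this, if_false, hw]
        exact hchar w
    refine ⟨D'.insert (PySem.List.pyGetD xs k 0) k, ?_, hins⟩
    unfold pvBackB
    simp only [List.map_cons, List.reverse_cons]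
    congr 1
    congr 1
    rw [hins]
    rfl

-- main bridge: A's outer fold and B's selection fold stay related
theorem pv_bridge (xs : List Int) (r : Int) :
    ∀ (m : Nat) (k : Int) (st : List Int × Bool) (best : Option (Int × Int × Int)),
      0 ≤ k → ((xs.length : Int) - k).toNat = m → pvRel xs r st best →
      pvRel xs r ((PySem.List.pyRange k (xs.length : Int) 1).foldl (pvOuterA xs r) st)
        (((PySem.List.pyRange k (xs.length : Int) 1).map (pvEntry xs r)).foldl (pvSelB xs) (best, k)).1 := by
  intro m
  induction m with
  | zero =>
    intro k st best hk0 hm hrel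
    rw [PySem.List.pyRange_one_eq_nil (by omega)]
    simpa using hrel
  | succ m ih =>
    intro k st best hk0 hm hrel
    have hk : k < (xs.length : Int) := by omega
    have hinv : pvInvA xs r st := by
      rcases hrel with ⟨h0, _⟩ | ⟨a, b, hst, _, hsum⟩
      · exact Or.inl h0
      · exact Or.inr ⟨a, b, hst, hsum⟩
    rw [PySem.List.pyRange_one_cons hk, List.map_cons, List.foldl_cons, List.foldl_cons]
    by_cases hp : pvG xs k < r
    · have hout : pvOuterA xs r st k =
          (match pvFind xs (r - pvG xs k) k with
           | none => st
           | some j => pvStep xs st k j) := by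
        unfold pvOuterA
        simp only [pvG] at hp
        rw [if_pos hp]
        exact pv_inner xs r k (((xs.length : Int) - k).toNat) k st rfl le_rfl hinv
      have hent : pvEntry xs r k = pvFind xs (r - pvG xs k) k := by
        unfold pvEntry
        rw [if_pos hp]
      cases hfind : pvFind xs (r - pvG xs k) k with
      | none =>
        rw [hout, hfind, hent, hfind]
        have hsel : pvSelB xs (best, k) none = (best, k + 1) := rfl
        rw [hsel]
        exact ih (k + 1) st best (by omega) (by omega) hrel
      | some j =>
        obtain ⟨hkj, hgj⟩ := pvFind_some xs (r - pvG xs k) k j hfind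
        rw [hout, hfind, hent, hfind]
        have hrel' : pvRel xs r (pvStep xs st k j) (pvSelB xs (best, k) (some j)).1 := by
          unfold pvStep pvSelB
          rcases hrel with ⟨h0, hb⟩ | ⟨a, b, hst, hbest, hsum⟩
          · rw [h0, hb]
            exact Or.inr ⟨k, j, by simp, by simp [pvG], by simp only [pvG] at hgj ⊢; omega⟩
          · rw [hst, hbest]
            simp only [pvGetD_pair_zero, pvGetD_pair_one, Bool.false_eq_true, if_false]
            by_cases hlt : max (pvG xs a) (pvG xs b) < max (pvG xs k) (pvG xs j)
            · rw [if_pos hlt]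
              have hgt : max (PySem.List.pyGetD xs k 0) (PySem.List.pyGetD xs j 0)
                  > max (pvG xs a) (pvG xs b) := by
                simp only [pvG] at hlt ⊢; omega
              rw [if_pos hgt]
              exact Or.inr ⟨k, j, rfl, by simp [pvG], by simp only [pvG] at hgj ⊢; omega⟩
            · rw [if_neg hlt]
              have hgt : ¬ (max (PySem.List.pyGetD xs k 0) (PySem.List.pyGetD xs j 0)
                  > max (pvG xs a) (pvG xs b)) := by
                simp only [pvG] at hlt ⊢; omega
              rw [if_neg hgt]
              exact Or.inr ⟨a, b, rfl, rfl, hsum⟩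
        have hsnd : (pvSelB xs (best, k) (some j)).2 = k + 1 := by
          unfold pvSelB; rfl
        have := ih (k + 1) (pvStep xs st k j) (pvSelB xs (best, k) (some j)).1 (by omega) (by omega) hrel'
        rwa [← hsnd, Prod.mk.eta] at this
    · have hout : pvOuterA xs r st k = st := by
        unfold pvOuterA
        simp only [pvG] at hp
        rw [if_neg hp]
      have hent : pvEntry xs r k = none := by
        unfold pvEntry
        rw [if_neg hp]
      rw [hout, hent]
      have hsel : pvSelB xs (best, k) none = (best, k + 1) := rfl
      rw [hsel]
      exact ih (k + 1) st best (by omega) (by omega) hrel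

-- ===== VERDICT (by name: the statement is the Claim_ definition above) =====
theorem IDsOfPackages_spec : Claim_equal_IDsOfPackages := by
  intro truckSpace xs _
  unfold Spec_IDsOfPackages IDsOfPackages IDsOfPackages_alt
  by_cases ht : truckSpace > 30
  · rw [if_pos ht, if_neg (by omega : ¬ truckSpace ≤ 30)]
    have hrev : PySem.List.pyRange ((xs.length : Int) - 1) (-1) (-1)
        = (PySem.List.pyRange 0 (xs.length : Int) 1).reverse := by
      have := PySem.List.pyRange_neg_one_eq_reverse ((xs.length : Int) - 1) (-1)
      simpa using this
    obtain ⟨D, hfold, -⟩ := pv_back xs (truckSpace - 30) ((xs.length : Int) - 0).toNat 0 le_rfl rfl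
    have hbridge := pv_bridge xs (truckSpace - 30) ((xs.length : Int) - 0).toNat 0 ([0, 0], true)
      none le_rfl rfl (Or.inl ⟨rfl, rfl⟩)
    simp only [hrev, hfold, List.reverse_reverse]
    rcases hbridge with ⟨hA, hB⟩ | ⟨a, b, hA, hB, -⟩
    · rw [hA, hB]
    · rw [hA, hB]
  · rw [if_neg ht, if_pos (by omega : truckSpace ≤ 30)]
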